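-- pv_equiv track=rewrite | github.com/zalepa/aoc2023 | day02/day02.py | get_maxes
-- ===== SOURCE A (Python) =====
-- def get_maxes(pulls):
--   maxes = {"blue": 0, "red": 0, "green": 0 }
--   for pull in pulls:
--     for color in pull:
--       if color[0] == 'blue' and color[1] > maxes[color[0]]:
--         maxes[color[0]] = color[1]
--       if color[0] == 'green' and color[1] > maxes[color[0]]:
--         maxes[color[0]] = color[1]
--       if color[0] == 'red' and color[1] > maxes[color[0]]:
--         maxes[color[0]] = color[1]
--
--   return maxes
-- ===== SOURCE B (Python) =====
-- def get_maxes(pulls):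
--   return {c: max([0] + [v[1] for pull in pulls for v in pull if v[0] == c])
--           for c in ('blue', 'red', 'green')}
-- ===== Notes on version B (the rewrite author's own statement) =====
-- stated objective: simpler
-- what changed: Replaces the interleaved mutating pass with three per-color guard branches by one dict comprehension that takes, independently for each of the three colors, the max of 0 and all matching counts.
import Mathlib
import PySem

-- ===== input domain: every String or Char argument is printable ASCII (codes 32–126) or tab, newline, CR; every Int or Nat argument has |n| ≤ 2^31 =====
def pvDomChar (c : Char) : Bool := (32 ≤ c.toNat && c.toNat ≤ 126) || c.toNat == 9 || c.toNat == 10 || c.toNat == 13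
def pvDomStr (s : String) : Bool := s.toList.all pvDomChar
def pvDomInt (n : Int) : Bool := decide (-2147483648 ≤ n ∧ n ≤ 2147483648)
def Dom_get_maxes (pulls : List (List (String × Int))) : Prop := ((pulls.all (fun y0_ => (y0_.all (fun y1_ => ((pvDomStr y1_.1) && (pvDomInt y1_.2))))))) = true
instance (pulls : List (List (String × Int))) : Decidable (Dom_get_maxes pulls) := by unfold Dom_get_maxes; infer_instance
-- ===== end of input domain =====

-- ===== PORT A =====
-- B replaces A's interleaved mutating max-update pass by an independent per-color max (simpler decomposition).
-- step function: the body of A's inner loop (three guarded updates of the running maxes dict)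
def pvStepA (m : PySem.Dict String Int) (color : String × Int) : PySem.Dict String Int :=
  let m := if color.1 == "blue" && color.2 > m.getD color.1 0 then m.insert color.1 color.2 else m
  let m := if color.1 == "green" && color.2 > m.getD color.1 0 then m.insert color.1 color.2 else m
  if color.1 == "red" && color.2 > m.getD color.1 0 then m.insert color.1 color.2 else m

def get_maxes (pulls : List (List (String × Int))) : List (String × Int) :=
  (pulls.foldl (fun m pull => pull.foldl pvStepA m)
    (PySem.Dict.ofList [("blue", 0), ("red", 0), ("green", 0)])).items

-- ===== PORT B =====
-- max([0] + vs) ported as vs.foldl max 0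
def get_maxes_alt (pulls : List (List (String × Int))) : List (String × Int) :=
  ["blue", "red", "green"].map (fun c =>
    (c, (pulls.flatMap (fun pull => (pull.filter (fun v => v.1 == c)).map (·.2))).foldl max 0))

-- ===== PRECONDITION & SPEC =====
def Spec_get_maxes (pulls : List (List (String × Int))) (out : List (String × Int)) : Prop := out = get_maxes_alt pulls
instance (pulls : List (List (String × Int))) (out : List (String × Int)) : Decidable (Spec_get_maxes pulls out) := by unfold Spec_get_maxes; infer_instance

-- ===== CLAIM (what is proved, stated in full; the proofs are below) =====
def Claim_equal_get_maxes : Prop := ∀ (pulls : List (List (String × Int))), Dom_get_maxes pulls → Spec_get_maxes pulls (get_maxes pulls)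

-- ===== LEMMAS AND PROOFS =====

-- ===== VERDICT (by name: the statement is the Claim_ definition above) =====
-- per-color running max over a flat list of (color, count) pairs
def pvFm (c : String) (acc : Int) (l : List (String × Int)) : Int :=
  ((l.filter (fun v => v.1 == c)).map (·.2)).foldl max acc

theorem pvStepA_state (b r g : Int) (x : String × Int) :
    pvStepA (PySem.Dict.mk [("blue", b), ("red", r), ("green", g)]) x =
      PySem.Dict.mk [("blue", pvFm "blue" b [x]), ("red", pvFm "red" r [x]),
        ("green", pvFm "green" g [x])] := by
  obtain ⟨c, v⟩ := x
  simp only [pvStepA, pvFm, List.filter_cons, List.filter_nil]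
  by_cases hb : c = "blue" <;> by_cases hg : c = "green" <;> by_cases hr : c = "red" <;>
    simp_all [PySem.Dict.insert, PySem.Dict.getD, PySem.Dict.get?, max_def, beq_iff_eq] <;>
    try (split_ifs <;> simp_all <;> omega)

theorem pvFoldA_state (l : List (String × Int)) (b r g : Int) :
    l.foldl pvStepA (PySem.Dict.mk [("blue", b), ("red", r), ("green", g)]) =
      PySem.Dict.mk [("blue", pvFm "blue" b l), ("red", pvFm "red" r l),
        ("green", pvFm "green" g l)] := by
  induction l generalizing b r g with
  | nil => rfl
  | cons x xs ih =>
      rw [List.foldl_cons, pvStepA_state, ih]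
      simp [pvFm, List.filter_cons]
      constructor <;> [skip; constructor] <;> split <;> rfl

theorem pvFoldA_flat (pulls : List (List (String × Int))) (d : PySem.Dict String Int) :
    pulls.foldl (fun m pull => pull.foldl pvStepA m) d =
      (pulls.flatMap id).foldl pvStepA d := by
  induction pulls generalizing d with
  | nil => rfl
  | cons p ps ih => simp [List.flatMap_cons, List.foldl_append, ih]

theorem pvFilter_flat (pulls : List (List (String × Int))) (c : String) :
    pulls.flatMap (fun pull => (pull.filter (fun v => v.1 == c)).map (·.2)) =
      ((pulls.flatMap id).filter (fun v => v.1 == c)).map (·.2) := by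
  induction pulls with
  | nil => rfl
  | cons p ps ih => simp [List.flatMap_cons, List.filter_append, ih]

theorem get_maxes_spec : Claim_equal_get_maxes := by
  intro pulls _
  unfold Spec_get_maxes get_maxes get_maxes_alt
  rw [show PySem.Dict.ofList [(("blue" : String), (0 : Int)), ("red", 0), ("green", 0)] =
        PySem.Dict.mk [("blue", 0), ("red", 0), ("green", 0)] from rfl,
      pvFoldA_flat, pvFoldA_state]
  simp [List.map, pvFm, pvFilter_flat]
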